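-- pv_equiv track=rewrite | github.com/obmun/dwarf_cpp_types | dwarf_cppdecl/types/scope_support.py | is_ns_blacklisted
-- ===== SOURCE A (Python) =====
-- from itertools import zip_longest
--
-- def is_namespace_glob_expression(val: list[str]) -> bool:
--     if not len(val):
--         raise ValueError("val cannot be an empty list")
--
--     start_pos = 0
--     try:
--         star_pos = val.index('*')
--     except ValueError as e:
--         # Namespace path does not contain *. It is not a NS glob expression
--         return False
--     if star_pos != len(val) - 1:
--         raise ValueError('Malformed glob expression')
--
-- def namespace_matches_glob_expression(ns: list[str], ns_glob_expr: list[str]) -> bool: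
--     assert is_namespace_glob_expression(ns_glob_expr)
--     for ns_elem, expr_elem in zip_longest(ns, ns_glob_expr):
--         if ns_elem is None:
--             if expr_elem == '*':
--                 # ns finished, but at the same point as the * operator is found in the glob_expr. E.g.:
--                 # - ns == ['Foo', 'Bar']
--                 # - expr: == [ 'Foo', 'Bar', '*']
--                 # The expr is considered as including ALL elements inside Foo::Bar. I.e., the full Foo::Bar.
--                 # Hence, this is a match
--                 return True
--             else:
--                 # Given NS is more general than the glob expr. The glob expr specifies a "deeper" scope, and hence does
--                 # not apply to this one
--                 return False
--         elif expr_elem is None: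
--             # We cannot reach this point :D. This is covered by the elif below
--             assert False
--             # The given NS is inside (child) the one in the glob expr
--             # As ATM we only support the '*' operator, this is fundamentally a match
--             # assert ns_glob_expr[-1] == '*'
--             # return True
--         elif expr_elem == '*':
--             # We reached the end of the glob expression. So far we matched the parent NSs => match
--             return True
--         elif ns_elem != expr_elem:
--             return False
--
--     # We cannot reach this point
--     assert False
--
-- _NAMESPACES_BLACKLIST = [
--     ['std', '*'],  # By default, unless a dependency, do not include any std:: content
--     # gnu_namespaces_matcher,
-- ]
--
-- def is_ns_blacklisted(ns: list[str]) -> bool: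
--     for blacklist_entry in _NAMESPACES_BLACKLIST:
--         match = False
--         if is_namespace_glob_expression(blacklist_entry):
--             match = namespace_matches_glob_expression(ns, blacklist_entry)
--         elif callable(blacklist_entry):
--             raise NotImplementedError('NS blacklist predicates still not implemented')
--         else:
--             match = ns == blacklist_entry
--         if match:
--             return True
--     return False
-- ===== SOURCE B (Python) =====
-- _NAMESPACES_BLACKLIST = [
--     ['std', '*'],  # do not include any std:: content
-- ]
--
-- def is_ns_blacklisted(ns: list[str]) -> bool:
--     for entry in _NAMESPACES_BLACKLIST:
--         if entry[-1] == '*':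
--             # glob entry: blacklists the prefix namespace and everything inside it
--             if ns[:len(entry) - 1] == entry[:-1]:
--                 return True
--         elif ns == entry:
--             return True
--     return False
-- ===== Notes on version B (the rewrite author's own statement) =====
-- stated objective: simpler
-- what changed: B replaces A's glob-expression detector and zip_longest matcher (whose matching branch is dead code because the detector falls off the end and returns None) with a direct prefix comparison against each '*'-terminated blacklist entry.
-- intended difference: On namespaces whose first element is 'std' other than the literal ['std','*'] (e.g. ['std'] or ['std','vector']), A returns False because its glob matcher is never invoked (the detector returns None, which is falsy), while B returns True; the blacklist entry ['std','*'] is evidently intended to blacklist everything inside std. — e.g. on is_ns_blacklisted(["std", "vector"]): A returns false, B returns true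
import Mathlib
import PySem

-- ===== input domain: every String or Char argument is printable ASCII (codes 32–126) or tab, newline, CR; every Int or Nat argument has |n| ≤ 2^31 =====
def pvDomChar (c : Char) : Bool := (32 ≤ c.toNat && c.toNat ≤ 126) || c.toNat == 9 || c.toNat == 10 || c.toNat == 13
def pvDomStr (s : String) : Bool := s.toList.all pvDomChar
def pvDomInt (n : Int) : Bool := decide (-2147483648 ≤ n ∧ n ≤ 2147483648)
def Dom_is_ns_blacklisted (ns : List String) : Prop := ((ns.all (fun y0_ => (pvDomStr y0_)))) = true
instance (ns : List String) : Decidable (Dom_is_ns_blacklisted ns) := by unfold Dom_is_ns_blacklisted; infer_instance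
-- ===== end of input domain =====

-- B does the intended prefix match for '*'-terminated blacklist entries instead of A's
-- glob machinery whose matching branch is dead code (the detector returns None): simpler;
-- on namespaces inside std:: (other than the literal ['std','*']) the values differ, see D_.

-- ===== PORT A =====
-- is_namespace_glob_expression: `some v` = Python returns v (none inside = Python None,
-- some false = Python False); outer `none` = ValueError raised.
def pvIsGlobExpr (val : List String) : Option (Option Bool) :=
  if val.length = 0 then none  -- raise ValueError
  else
    match PySem.List.index? val "*" with
    | none => some (some false)
    | some star_pos =>
      if star_pos ≠ (val.length : Int) - 1 then none  -- raise ValueError('Malformed glob expression')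
      else some none  -- falls off the end: returns None

-- truthiness of the helper's return value (None and False are falsy)
def pvTruthy : Option Bool → Bool
  | none => false
  | some b => b

-- namespace_matches_glob_expression's zip_longest loop; `none` = assert False reached
def pvNsMatchLoop : List String → List String → Option Bool
  | [], [] => none                      -- loop ends: assert False
  | [], e :: _ => if e = "*" then some true else some false  -- ns_elem is None
  | _ :: _, [] => none                  -- expr_elem is None: assert False
  | n :: ns, e :: es =>
      if e = "*" then some true
      else if n ≠ e then some false
      else pvNsMatchLoop ns es

-- the for-loop over _NAMESPACES_BLACKLIST
def pvBlacklistLoop (ns : List String) : List (List String) → Bool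
  | [] => false
  | entry :: rest =>
    let m :=
      match pvIsGlobExpr entry with
      | none => false  -- ValueError: unreachable for the constant blacklist
      | some r =>
        if pvTruthy r then pvTruthy (pvNsMatchLoop ns entry)  -- truthiness of the matcher's value
        else ns == entry  -- entries are lists, never callable
    if m then true else pvBlacklistLoop ns rest

def is_ns_blacklisted (ns : List String) : Bool :=
  pvBlacklistLoop ns [["std", "*"]]

-- ===== PORT B =====
def pvAltLoop (ns : List String) : List (List String) → Bool
  | [] => false
  | entry :: rest =>
    if PySem.List.pyGet? entry (-1) = some "*" then
      if PySem.List.slice ns none (some ((entry.length : Int) - 1)) =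
         PySem.List.slice entry none (some (-1)) then true
      else pvAltLoop ns rest
    else if ns = entry then true
    else pvAltLoop ns rest

def is_ns_blacklisted_alt (ns : List String) : Bool :=
  pvAltLoop ns [["std", "*"]]

-- ===== PRECONDITION & SPEC =====
-- On namespaces starting with "std" other than ["std","*"] itself, A returns false (its glob
-- matcher is dead code) while B returns true; the entry ['std','*'] is intended to blacklist
-- everything inside std.
def D_is_ns_blacklisted (ns : List String) : Prop :=
  ns.head? = some "std" ∧ ns ≠ ["std", "*"]
instance (ns : List String) : Decidable (D_is_ns_blacklisted ns) := by
  unfold D_is_ns_blacklisted; infer_instance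

def Spec_is_ns_blacklisted (ns : List String) (out : Bool) : Prop :=
  ¬ D_is_ns_blacklisted ns → out = is_ns_blacklisted_alt ns
instance (ns : List String) (out : Bool) : Decidable (Spec_is_ns_blacklisted ns out) := by
  unfold Spec_is_ns_blacklisted; infer_instance

def pvDiffWitness_is_ns_blacklisted : List String := ["std", "vector"]
def pvDiffWitnessOut_is_ns_blacklisted : Bool × Bool := (false, true)

-- ===== CLAIM =====
def Claim_unchanged_is_ns_blacklisted : Prop :=
  ∀ (ns : List String), Dom_is_ns_blacklisted ns →
    Spec_is_ns_blacklisted ns (is_ns_blacklisted ns)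
def Claim_changed_is_ns_blacklisted : Prop :=
  Dom_is_ns_blacklisted (pvDiffWitness_is_ns_blacklisted) ∧
  D_is_ns_blacklisted (pvDiffWitness_is_ns_blacklisted) ∧
  is_ns_blacklisted (pvDiffWitness_is_ns_blacklisted) = pvDiffWitnessOut_is_ns_blacklisted.1 ∧
  is_ns_blacklisted_alt (pvDiffWitness_is_ns_blacklisted) = pvDiffWitnessOut_is_ns_blacklisted.2 ∧
  pvDiffWitnessOut_is_ns_blacklisted.1 ≠ pvDiffWitnessOut_is_ns_blacklisted.2
def Claim_exact_is_ns_blacklisted : Prop :=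
  ∀ (ns : List String), Dom_is_ns_blacklisted ns → D_is_ns_blacklisted ns →
    is_ns_blacklisted ns ≠ is_ns_blacklisted_alt ns

-- ===== LEMMAS AND PROOFS =====

-- A reduces to the literal comparison (the glob branch is dead: the detector returns None)
theorem portA_eq (ns : List String) : is_ns_blacklisted ns = (ns == ["std", "*"]) := by
  unfold is_ns_blacklisted pvBlacklistLoop
  have h : pvIsGlobExpr ["std", "*"] = some none := by decide
  rw [h]
  cases hb : ns == ["std", "*"] <;> simp_all [pvTruthy, pvBlacklistLoop]

-- B reduces to the prefix test against ["std"]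
theorem portB_eq (ns : List String) :
    is_ns_blacklisted_alt ns = (ns.take 1 == ["std"]) := by
  unfold is_ns_blacklisted_alt pvAltLoop
  have h1 : PySem.List.slice ns none (some ((2 : Int) - 1)) = ns.take 1 := by
    norm_num [PySem.List.slice_to]
  have h2 : PySem.List.slice ["std", "*"] none (some (-1)) = ["std"] := by decide
  have hg : PySem.List.pyGet? ["std", "*"] (-1) = some "*" := by decide
  simp only [List.length_cons, List.length_nil]
  norm_num [h1, h2, hg]
  cases hb : ns.take 1 == ["std"] <;> simp_all [pvAltLoop]

-- ===== VERDICT =====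
theorem is_ns_blacklisted_spec : Claim_unchanged_is_ns_blacklisted := by
  intro ns _ hnd
  rw [portA_eq, portB_eq]
  unfold D_is_ns_blacklisted at hnd
  match ns with
  | [] => decide
  | h :: t =>
    by_cases hh : h = "std"
    · subst hh
      have ht : "std" :: t = ["std", "*"] := by
        by_contra hc; exact hnd ⟨rfl, hc⟩
      rw [ht]; decide
    · simp [List.take, hh]

theorem is_ns_blacklisted_changed : Claim_changed_is_ns_blacklisted := by
  unfold Claim_changed_is_ns_blacklisted; decide

theorem is_ns_blacklisted_tight : Claim_exact_is_ns_blacklisted := by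
  intro ns _ hd
  obtain ⟨hh, hne⟩ := hd
  rw [portA_eq, portB_eq]
  cases ns with
  | nil => simp at hh
  | cons h t =>
    have hh' : h = "std" := by simpa using hh
    subst hh'
    have hne' : t ≠ ["*"] := fun h => hne (by rw [h])
    simp [List.take, hne']
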